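-- pv_equiv track=rewrite | github.com/Robby-Blue/latex-combiner | src/doc_rewriter.py | find_indexed_commands
-- ===== SOURCE A (Python) =====
-- def find_indexed_commands(src, commands):
--     found_commands = []
--     index = 0
--
--     while True:
--         found_index = None
--         found_command = None
--         for command in commands:
--             for suffix in ["[", "{", "*[", "*{"]:
--                 effective_command = "\\"+command+suffix
--                 if effective_command not in src[index+1:]:
--                     continue
--                 command_index = src.index(effective_command, index+1)
--                 if found_index is None or command_index < found_index:
--                     found_index = command_index
--                     found_command = command + suffix[:-1]
--
--         if found_index is None:
--             break
--
--         index = found_index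
--         found_commands.append((index, found_command))
--
--     return found_commands
-- ===== SOURCE B (Python) =====
-- def find_indexed_commands(src, commands):
--     patterns = [("\\" + c + s, c + s[:-1])
--                 for c in commands for s in ["[", "{", "*[", "*{"]]
--     found_commands = []
--     j = src.find("\\", 1)
--     while j != -1:
--         for pattern, name in patterns:
--             if src.startswith(pattern, j):
--                 found_commands.append((j, name))
--                 break
--         j = src.find("\\", j + 1)
--     return found_commands
-- ===== Notes on version B (the rewrite author's own statement) =====
-- stated objective: faster
-- what changed: A rescans the whole string for every command+suffix pattern on every reported match to pick the minimum next index; B makes one advancing str.find scan over the backslash positions of src and reports the first pattern (in A's priority order) matching at each position, so no pattern is ever searched for globally.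
import Mathlib
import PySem

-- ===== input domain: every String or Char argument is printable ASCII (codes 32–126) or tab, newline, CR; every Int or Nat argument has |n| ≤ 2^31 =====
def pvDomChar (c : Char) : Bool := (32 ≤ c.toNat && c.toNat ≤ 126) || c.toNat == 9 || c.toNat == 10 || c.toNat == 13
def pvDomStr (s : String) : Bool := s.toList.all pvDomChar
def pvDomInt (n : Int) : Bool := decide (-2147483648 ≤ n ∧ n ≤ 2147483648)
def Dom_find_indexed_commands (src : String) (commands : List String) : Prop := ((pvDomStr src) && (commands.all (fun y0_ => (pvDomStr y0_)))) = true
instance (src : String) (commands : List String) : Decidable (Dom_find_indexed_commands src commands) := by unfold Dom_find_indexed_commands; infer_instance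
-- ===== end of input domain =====

-- B replaces A's repeated whole-string minimum-rescans over every pattern by a single
-- advancing scan over the backslash positions of src (objective: faster; measured).

-- ===== PORT A =====
def pvSuffixes : List String := ["[", "{", "*[", "*{"]

-- one step of A's inner double loop: acc = (found_index, found_command)
def pvAStep (src : String) (index : Int) (acc : Option Int × Option String)
    (command suffix : String) : Option Int × Option String :=
  let effective := "\\" ++ command ++ suffix
  if PySem.Str.isIn effective (PySem.Str.slice src (some (index + 1)) none) = false then acc
  else
    -- src.index(effective, index+1): guarded by the membership test above, so it
    -- coincides with str.find, ported as findFrom (never -1 on this branch)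
    let command_index := PySem.Str.findFrom src effective (index + 1) none
    match acc.1 with
    | none => (some command_index, some (command ++ PySem.Str.slice suffix none (some (-1))))
    | some found_index =>
        if command_index < found_index then
          (some command_index, some (command ++ PySem.Str.slice suffix none (some (-1))))
        else acc

def pvAInner (src : String) (index : Int) (commands : List String) : Option Int × Option String :=
  commands.foldl (fun acc command =>
    pvSuffixes.foldl (fun acc suffix => pvAStep src index acc command suffix) acc) (none, none)

-- A's 'while True' loop; index strictly increases each round, so src-length fuel suffices
def pvALoop (src : String) (commands : List String) :
    Nat → Int → List (Int × String) → List (Int × String)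
  | 0, _, acc => acc
  | fuel + 1, index, acc =>
      match pvAInner src index commands with
      | (some found_index, some found_command) =>
          pvALoop src commands fuel found_index (acc ++ [(found_index, found_command)])
      | _ => acc  -- found_index = None: break (found_command is always set when found_index is)

def find_indexed_commands (src : String) (commands : List String) : List (Int × String) :=
  pvALoop src commands (src.toList.length + 1) 0 []

-- ===== PORT B =====
-- first pattern (in list order) matching at position j: the inner for-with-break;
-- src.startswith(pattern, j) is ported by hand as a prefix test on the drop at j (exact for j ≥ 0, and here j ≥ 1)
def pvBFirst (s : List Char) (j : Int) : List (String × String) → Option String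
  | [] => none
  | q :: rest =>
      if q.1.toList.isPrefixOf (s.drop j.toNat) then some q.2 else pvBFirst s j rest

-- B's 'while j != -1' loop over backslash positions; j strictly increases, so src-length fuel suffices
def pvBLoop (src : String) (patterns : List (String × String)) :
    Nat → Int → List (Int × String) → List (Int × String)
  | 0, _, acc => acc
  | fuel + 1, j, acc =>
      if j = -1 then acc
      else
        let acc' := match pvBFirst src.toList j patterns with
          | some name => acc ++ [(j, name)]
          | none => acc
        pvBLoop src patterns fuel (PySem.Str.findFrom src "\\" (j + 1) none) acc'

def find_indexed_commands_alt (src : String) (commands : List String) : List (Int × String) :=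
  let patterns := commands.flatMap (fun c => pvSuffixes.map
    (fun sfx => ("\\" ++ c ++ sfx, c ++ PySem.Str.slice sfx none (some (-1)))))
  pvBLoop src patterns (src.toList.length + 1) (PySem.Str.findFrom src "\\" 1 none) []

-- ===== PRECONDITION & SPEC =====
def Spec_find_indexed_commands (src : String) (commands : List String) (out : List (Int × String)) : Prop := out = find_indexed_commands_alt src commands
instance (src : String) (commands : List String) (out : List (Int × String)) : Decidable (Spec_find_indexed_commands src commands out) := by unfold Spec_find_indexed_commands; infer_instance

-- ===== CLAIM (what is proved, stated in full; the proofs are below) =====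
def Claim_equal_find_indexed_commands : Prop := ∀ (src : String) (commands : List String), Dom_find_indexed_commands src commands → Spec_find_indexed_commands src commands (find_indexed_commands src commands)

-- ===== LEMMAS AND PROOFS =====

-- the priority-ordered list of (pattern, displayed name) pairs both programs range over
def pvPats (commands : List String) : List (String × String) :=
  commands.flatMap (fun c => pvSuffixes.map
    (fun sfx => ("\\" ++ c ++ sfx, c ++ PySem.Str.slice sfx none (some (-1)))))

lemma pvPats_ne_nil (commands : List String) :
    ∀ q ∈ pvPats commands, q.1.toList ≠ [] := by
  intro q hq
  simp only [pvPats, pvSuffixes, List.mem_flatMap, List.mem_map] at hq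
  obtain ⟨c, _, sfx, _, rfl⟩ := hq
  simp [String.toList_append]

-- name of the first pattern (in priority order) matching at position j, if any
def pvFM (s : List Char) (j : Nat) : List (String × String) → Option String
  | [] => none
  | q :: rest => if q.1.toList.isPrefixOf (s.drop j) then some q.2 else pvFM s j rest

-- the common value: every position in (i, len) carrying a match, in increasing order
def pvCanon (s : List Char) (Q : List (String × String)) (i : Nat) : List (Int × String) :=
  (PySem.List.pyRange ((i : Int) + 1) (s.length) 1).filterMap
    (fun j => (pvFM s j.toNat Q).map (fun nm => (j, nm)))

-- first occurrence of pat at a position ≥ c, as A's findFrom computes it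
def pvOccFirst (s pat : List Char) (c : Nat) : Option Nat :=
  let f := PySem.Chars.findFrom s pat (c : Int) none
  if f = -1 then none else some f.toNat

-- (position, name) A's inner scan settles on, computed by structural recursion
def pvBest (s : List Char) (i : Nat) : List (String × String) → Option (Nat × String)
  | [] => none
  | q :: rest =>
      match pvOccFirst s q.1.toList (i + 1), pvBest s i rest with
      | none, r => r
      | some j, none => some (j, q.2)
      | some j, some (j', nm') => if j ≤ j' then some (j, q.2) else some (j', nm')

def pvCombine (acc : Option Int × Option String) :
    Option (Nat × String) → Option Int × Option String
  | none => acc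
  | some (j, nm) =>
      match acc.1 with
      | none => (some (j : Int), some nm)
      | some fi => if (j : Int) < fi then (some (j : Int), some nm) else acc

lemma pvAInner_eq_foldQ (src : String) (i : Int) (commands : List String) :
    pvAInner src i commands
      = (pvPats commands).foldl (fun acc q =>
          if PySem.Str.isIn q.1 (PySem.Str.slice src (some (i + 1)) none) = false then acc
          else
            let ci := PySem.Str.findFrom src q.1 (i + 1) none
            match acc.1 with
            | none => (some ci, some q.2)
            | some fi => if ci < fi then (some ci, some q.2) else acc) (none, none) := by
  simp only [pvAInner, pvPats, List.foldl_flatMap, List.foldl_map]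
  rfl

lemma pvOccFirst_none_iff (s pat : List Char) (c : Nat) (hc : c ≤ s.length) :
    pvOccFirst s pat c = none ↔ ¬ pat <:+: s.drop c := by
  rw [← PySem.Chars.findFrom_natCast_eq_neg_one_iff s pat c hc]
  simp [pvOccFirst]

lemma pvOccFirst_some_spec (s pat : List Char) (c k : Nat) (hc : c ≤ s.length)
    (h : pvOccFirst s pat c = some k) :
    c ≤ k ∧ pat <+: s.drop k ∧ ∀ m, c ≤ m → m < k → ¬ pat <+: s.drop m := by
  simp only [pvOccFirst] at h
  split at h
  · exact absurd h (by simp)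
  · rename_i hne
    obtain ⟨h1, h2, h3⟩ := PySem.Chars.findFrom_natCast_spec s pat c hc hne
    obtain rfl : (PySem.Chars.findFrom s pat (c:Int) none).toNat = k := by
      simpa using h
    exact ⟨by omega, h2, h3⟩

lemma pvStep_char (src : String) (i : Nat) (hi : i + 1 ≤ src.toList.length)
    (q : String × String) (acc : Option Int × Option String) :
    (if PySem.Str.isIn q.1 (PySem.Str.slice src (some ((i : Int) + 1)) none) = false then acc
     else
       let ci := PySem.Str.findFrom src q.1 ((i : Int) + 1) none
       match acc.1 with
       | none => (some ci, some q.2)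
       | some fi => if ci < fi then (some ci, some q.2) else acc)
    = (match pvOccFirst src.toList q.1.toList (i + 1) with
       | none => acc
       | some k =>
          match acc.1 with
          | none => (some (k : Int), some q.2)
          | some fi => if (k : Int) < fi then (some (k : Int), some q.2) else acc) := by
  have hcast : ((i : Int) + 1) = ((i + 1 : Nat) : Int) := by push_cast; ring
  simp only [PySem.Str.isIn_eq, PySem.Str.toList_slice, PySem.Str.findFrom_eq,
    PySem.Chars.slice_eq_listSlice, hcast, PySem.List.slice_from_natCast]
  by_cases hin : PySem.Chars.isIn q.1.toList (src.toList.drop (i + 1)) = false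
  · have hninf : ¬ q.1.toList <:+: src.toList.drop (i + 1) :=
      (PySem.Chars.isIn_eq_false_iff _ _).mp hin
    have hocc : pvOccFirst src.toList q.1.toList (i + 1) = none := by
      rw [pvOccFirst_none_iff _ _ _ hi]; exact hninf
    simp [hin, hocc]
  · rw [Bool.not_eq_false] at hin
    have hinf : q.1.toList <:+: src.toList.drop (i + 1) :=
      (PySem.Chars.isIn_iff_infix _ _).mp hin
    have hne : PySem.Chars.findFrom src.toList q.1.toList ((i + 1 : Nat) : Int) none ≠ -1 := by
      rw [Ne, PySem.Chars.findFrom_natCast_eq_neg_one_iff _ _ _ hi]; simpa using hinf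
    have hocc : pvOccFirst src.toList q.1.toList (i + 1)
        = some (PySem.Chars.findFrom src.toList q.1.toList ((i + 1 : Nat) : Int) none).toNat := by
      simp only [pvOccFirst]
      rw [if_neg hne]
    have hfpos : (0 : Int) ≤ PySem.Chars.findFrom src.toList q.1.toList ((i + 1 : Nat) : Int) none := by
      have := (PySem.Chars.findFrom_natCast_spec src.toList q.1.toList (i + 1) hi hne).1
      omega
    rw [if_neg (by simp [hin]), hocc]
    simp only []
    rw [Int.toNat_of_nonneg hfpos]

lemma pvFoldQ_eq_combine (src : String) (i : Nat) (hi : i + 1 ≤ src.toList.length)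
    (Q : List (String × String)) :
    ∀ acc, Q.foldl (fun acc q =>
          if PySem.Str.isIn q.1 (PySem.Str.slice src (some ((i : Int) + 1)) none) = false then acc
          else
            let ci := PySem.Str.findFrom src q.1 ((i : Int) + 1) none
            match acc.1 with
            | none => (some ci, some q.2)
            | some fi => if ci < fi then (some ci, some q.2) else acc) acc
      = pvCombine acc (pvBest src.toList i Q) := by
  induction Q with
  | nil => intro acc; rfl
  | cons q rest ih =>
    intro acc
    rw [List.foldl_cons, ih, pvStep_char src i hi q acc]
    cases hocc : pvOccFirst src.toList q.1.toList (i + 1) with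
    | none => simp [pvBest, hocc]
    | some k =>
      cases hb : pvBest src.toList i rest with
      | none =>
        rcases acc with ⟨a1, a2⟩
        cases a1 <;> simp [pvBest, hocc, hb, pvCombine]
      | some p =>
        obtain ⟨j', nm'⟩ := p
        rcases acc with ⟨a1, a2⟩
        by_cases hkj : k ≤ j'
        · have hjk : ¬ ((j' : Int) < (k : Int)) := by omega
          cases a1 with
          | none => simp [pvBest, hocc, hb, pvCombine, hkj, hjk]
          | some fi =>
            by_cases hkfi : (k : Int) < fi
            · simp [pvBest, hocc, hb, pvCombine, hkj, hjk, hkfi]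
            · have hjfi : ¬ ((j' : Int) < fi) := by omega
              simp [pvBest, hocc, hb, pvCombine, hkj, hkfi, hjfi]
        · have hjk : ((j' : Int) < (k : Int)) := by omega
          cases a1 with
          | none => simp [pvBest, hocc, hb, pvCombine, hkj, hjk]
          | some fi =>
            by_cases hkfi : (k : Int) < fi
            · have hjfi : ((j' : Int) < fi) := by omega
              simp [pvBest, hocc, hb, pvCombine, hkj, hjk, hkfi, hjfi]
            · simp [pvBest, hocc, hb, pvCombine, hkj, hkfi]

lemma pvPrefix_drop_infix (s pat : List Char) (c j : Nat) (hcj : c ≤ j)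
    (h : pat <+: s.drop j) : pat <:+: s.drop c := by
  have hd : s.drop j = (s.drop c).drop (j - c) := by
    rw [List.drop_drop]; congr 1; omega
  rw [hd] at h
  exact h.isInfix.trans (List.drop_suffix _ _).isInfix

lemma pvPrefix_lt_len (s pat : List Char) (k : Nat)
    (hpat : pat ≠ []) (hpre : pat <+: s.drop k) : k < s.length := by
  rcases hpre with ⟨t, ht⟩
  have hnn : s.drop k ≠ [] := by
    intro hnil; rw [hnil] at ht; exact hpat (List.append_eq_nil_iff.mp ht).1
  have := List.drop_eq_nil_iff.not.mp hnn
  omega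

lemma pvBest_none (s : List Char) (i : Nat) (hi : i + 1 ≤ s.length)
    (Q : List (String × String)) (h : pvBest s i Q = none) :
    ∀ j, i < j → pvFM s j Q = none := by
  induction Q with
  | nil => intro j _; rfl
  | cons q rest ih =>
    intro j hj
    cases hocc : pvOccFirst s q.1.toList (i + 1) with
    | some k =>
      exfalso
      rw [pvBest, hocc] at h
      cases hb : pvBest s i rest <;> rw [hb] at h <;> simp at h
      rename_i p; obtain ⟨j', nm'⟩ := p
      split at h <;> simp at h
    | none =>
      have hrest : pvBest s i rest = none := by
        rw [pvBest, hocc] at h; exact h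
      have hninf : ¬ q.1.toList <:+: s.drop (i + 1) :=
        (pvOccFirst_none_iff s q.1.toList (i + 1) hi).mp hocc
      have hnp : ¬ q.1.toList.isPrefixOf (s.drop j) := by
        rw [List.isPrefixOf_iff_prefix]
        intro hp
        exact hninf (pvPrefix_drop_infix s q.1.toList (i + 1) j (by omega) hp)
      rw [pvFM, if_neg (by simpa using hnp)]
      exact ih hrest j hj

lemma pvBest_some (s : List Char) (i : Nat) (hi : i + 1 ≤ s.length)
    (Q : List (String × String)) (hQ : ∀ q ∈ Q, q.1.toList ≠ []) (j0 : Nat) (nm : String)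
    (h : pvBest s i Q = some (j0, nm)) :
    i < j0 ∧ j0 < s.length ∧ pvFM s j0 Q = some nm ∧
      ∀ j, i < j → j < j0 → pvFM s j Q = none := by
  induction Q generalizing j0 nm with
  | nil => simp [pvBest] at h
  | cons q rest ih =>
    have hq1 : q.1.toList ≠ [] := hQ q (by simp)
    have hQr : ∀ q ∈ rest, q.1.toList ≠ [] := fun p hp => hQ p (by simp [hp])
    cases hocc : pvOccFirst s q.1.toList (i + 1) with
    | none =>
      -- q never matches at any j ≥ i+1
      have hninf : ¬ q.1.toList <:+: s.drop (i + 1) :=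
        (pvOccFirst_none_iff s q.1.toList (i + 1) hi).mp hocc
      have hno : ∀ j, i < j → ¬ q.1.toList.isPrefixOf (s.drop j) := by
        intro j hj
        rw [List.isPrefixOf_iff_prefix]
        intro hp
        exact hninf (pvPrefix_drop_infix s q.1.toList (i + 1) j (by omega) hp)
      rw [pvBest, hocc] at h
      obtain ⟨h1, h2, h3, h4⟩ := ih hQr j0 nm h
      refine ⟨h1, h2, ?_, ?_⟩
      · rw [pvFM, if_neg (by simpa using hno j0 h1)]; exact h3
      · intro j hj hj0
        rw [pvFM, if_neg (by simpa using hno j hj)]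
        exact h4 j hj hj0
    | some k =>
      obtain ⟨hk1, hk2, hk3⟩ := pvOccFirst_some_spec s q.1.toList (i + 1) k hi hocc
      have hklen : k < s.length := pvPrefix_lt_len s q.1.toList k hq1 hk2
      rw [pvBest, hocc] at h
      cases hb : pvBest s i rest with
      | none =>
        rw [hb] at h
        simp only [Option.some_inj] at h
        obtain ⟨rfl, rfl⟩ : k = j0 ∧ q.2 = nm := by
          constructor <;> [exact congrArg Prod.fst h; exact congrArg Prod.snd h]
        have hrest := pvBest_none s i hi rest hb
        refine ⟨by omega, hklen, ?_, ?_⟩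
        · rw [pvFM, if_pos (by simpa [List.isPrefixOf_iff_prefix] using hk2)]
        · intro j hj hj0
          rw [pvFM, if_neg]
          · exact hrest j hj
          · simp only [List.isPrefixOf_iff_prefix]
            exact hk3 j (by omega) hj0
      | some p =>
        obtain ⟨j', nm'⟩ := p
        rw [hb] at h
        obtain ⟨h1', h2', h3', h4'⟩ := ih hQr j' nm' hb
        by_cases hkj : k ≤ j'
        · simp only [if_pos hkj, Option.some_inj] at h
          obtain ⟨rfl, rfl⟩ : k = j0 ∧ q.2 = nm := by
            constructor <;> [exact congrArg Prod.fst h; exact congrArg Prod.snd h]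
          refine ⟨by omega, hklen, ?_, ?_⟩
          · rw [pvFM, if_pos (by simpa [List.isPrefixOf_iff_prefix] using hk2)]
          · intro j hj hj0
            rw [pvFM, if_neg]
            · exact h4' j hj (by omega)
            · simp only [List.isPrefixOf_iff_prefix]
              exact hk3 j (by omega) hj0
        · simp only [if_neg hkj, Option.some_inj] at h
          obtain ⟨he1, he2⟩ : j' = j0 ∧ nm' = nm := by
            constructor <;> [exact congrArg Prod.fst h; exact congrArg Prod.snd h]
          subst he1; subst he2
          refine ⟨h1', h2', ?_, ?_⟩
          · rw [pvFM, if_neg]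
            · exact h3'
            · simp only [List.isPrefixOf_iff_prefix]
              exact hk3 j' (by omega) (by omega)
          · intro j hj hj0
            rw [pvFM, if_neg]
            · exact h4' j hj hj0
            · simp only [List.isPrefixOf_iff_prefix]
              exact hk3 j (by omega) (by omega)

lemma pvAInner_big (src : String) (i : Nat) (hi : src.toList.length ≤ i)
    (commands : List String) : pvAInner src (i : Int) commands = (none, none) := by
  rw [pvAInner_eq_foldQ]
  have hQ := pvPats_ne_nil commands
  generalize pvPats commands = Q at hQ
  induction Q with
  | nil => rfl
  | cons q rest ih =>
    rw [List.foldl_cons, if_pos, ih (fun p hp => hQ p (by simp [hp]))]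
    have hcast : ((i : Int) + 1) = ((i + 1 : Nat) : Int) := by push_cast; ring
    have hdrop : src.toList.drop (i + 1) = [] := List.drop_eq_nil_of_le (by omega)
    rw [PySem.Str.isIn_eq, PySem.Str.toList_slice, PySem.Chars.slice_eq_listSlice, hcast,
      PySem.List.slice_from_natCast, hdrop]
    rw [PySem.Chars.isIn_eq_false_iff]
    simpa using hQ q (by simp)

lemma pvALoop_eq_canon (src : String) (commands : List String) :
    ∀ fuel (i : Nat) acc, src.toList.length ≤ i + fuel →
      pvALoop src commands fuel (i : Int) acc
        = acc ++ pvCanon src.toList (pvPats commands) i := by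
  intro fuel
  induction fuel with
  | zero =>
    intro i acc hle
    rw [pvALoop, pvCanon, PySem.List.pyRange_one_eq_nil (by omega)]
    simp
  | succ fuel ih =>
    intro i acc hle
    by_cases hlen : src.toList.length ≤ i
    · rw [pvALoop, pvAInner_big src i hlen commands, pvCanon,
        PySem.List.pyRange_one_eq_nil (by omega)]
      simp
    · have hi : i + 1 ≤ src.toList.length := by omega
      have hinner : pvAInner src (i : Int) commands
          = pvCombine (none, none) (pvBest src.toList i (pvPats commands)) := by
        rw [pvAInner_eq_foldQ]; exact pvFoldQ_eq_combine src i hi _ _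
      cases hb : pvBest src.toList i (pvPats commands) with
      | none =>
        rw [pvALoop, hinner, hb]
        have hnil : pvCanon src.toList (pvPats commands) i = [] := by
          rw [pvCanon, List.filterMap_eq_nil_iff]
          intro j hj
          rw [PySem.List.mem_pyRange_one] at hj
          have : pvFM src.toList j.toNat (pvPats commands) = none := by
            apply pvBest_none src.toList i hi _ hb
            omega
          rw [this]; rfl
        rw [hnil]; simp [pvCombine]
      | some p =>
        obtain ⟨j0, nm⟩ := p
        obtain ⟨h1, h2, h3, h4⟩ :=
          pvBest_some src.toList i hi (pvPats commands) (pvPats_ne_nil commands) j0 nm hb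
        rw [pvALoop, hinner, hb]
        simp only [pvCombine]
        have hfuel : src.toList.length ≤ j0 + fuel := by omega
        have hrec : pvALoop src commands fuel ((j0 : Nat) : Int) (acc ++ [((j0 : Int), nm)])
            = (acc ++ [((j0 : Int), nm)]) ++ pvCanon src.toList (pvPats commands) j0 :=
          ih j0 (acc ++ [((j0 : Int), nm)]) hfuel
        rw [hrec]
        have hsplit : pvCanon src.toList (pvPats commands) i
            = ((j0 : Int), nm) :: pvCanon src.toList (pvPats commands) j0 := by
          rw [pvCanon, PySem.List.pyRange_one_append ((i : Int) + 1) (j0 : Int)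
              (src.toList.length) (by omega) (by omega),
            PySem.List.pyRange_one_cons (a := (j0 : Int)) (b := (src.toList.length : Int)) (by omega)]
          rw [List.filterMap_append, List.filterMap_cons]
          have hfirst : List.filterMap
              (fun j => (pvFM src.toList j.toNat (pvPats commands)).map (fun nm => (j, nm)))
              (PySem.List.pyRange ((i : Int) + 1) (j0 : Int) 1) = [] := by
            rw [List.filterMap_eq_nil_iff]
            intro j hj
            rw [PySem.List.mem_pyRange_one] at hj
            rw [h4 j.toNat (by omega) (by omega)]; rfl
          rw [hfirst]
          rw [show ((j0 : Int)).toNat = j0 from Int.toNat_natCast j0, h3]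
          simp [pvCanon]
        rw [hsplit]
        simp

lemma pvA_eq_canon (src : String) (commands : List String) :
    find_indexed_commands src commands = pvCanon src.toList (pvPats commands) 0 := by
  have h := pvALoop_eq_canon src commands (src.toList.length + 1) 0 [] (by omega)
  simpa using h

lemma pvFindFrom_gt_len (s pat : List Char) (c : Nat) (h : s.length < c) :
    PySem.Chars.findFrom s pat (c : Int) none = -1 := by
  simp only [PySem.Chars.findFrom]
  norm_num
  omega


-- ==== B side ====

lemma pvPats_head (commands : List String) :
    ∀ q ∈ pvPats commands, ∃ t, q.1.toList = '\\' :: t := by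
  intro q hq
  simp only [pvPats, pvSuffixes, List.mem_flatMap, List.mem_map] at hq
  obtain ⟨cc, _, sfx, _, rfl⟩ := hq
  exact ⟨cc.toList ++ sfx.toList, by simp [String.toList_append]⟩

lemma pvBFirst_eq_pvFM (s : List Char) (j : Int) (Q : List (String × String)) :
    pvBFirst s j Q = pvFM s j.toNat Q := by
  induction Q with
  | nil => rfl
  | cons q rest ih => rw [pvBFirst, pvFM, ih]

lemma pvFM_none_of_no_bs (s : List Char) (Q : List (String × String))
    (hQ : ∀ q ∈ Q, ∃ t, q.1.toList = '\\' :: t) (k : Nat)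
    (h : ¬ ['\\'] <+: s.drop k) : pvFM s k Q = none := by
  induction Q with
  | nil => rfl
  | cons q rest ih =>
    rw [pvFM, if_neg, ih (fun p hp => hQ p (by simp [hp]))]
    simp only [List.isPrefixOf_iff_prefix]
    intro hp
    obtain ⟨t, ht⟩ := hQ q (by simp)
    rw [ht] at hp
    obtain ⟨r, hr⟩ := hp
    exact h ⟨t ++ r, by simpa using hr⟩

-- pvCanon with the range starting at an arbitrary c (pvCanon s Q i = pvCanonF s Q (i+1))
def pvCanonF (s : List Char) (Q : List (String × String)) (c : Nat) : List (Int × String) :=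
  (PySem.List.pyRange (c : Int) (s.length) 1).filterMap
    (fun j => (pvFM s j.toNat Q).map (fun nm => (j, nm)))

lemma pvCanon_eq_F (s : List Char) (Q : List (String × String)) (i : Nat) :
    pvCanon s Q i = pvCanonF s Q (i + 1) := by
  rw [pvCanon, pvCanonF]
  norm_cast

lemma pvBLoop_eq (src : String) (commands : List String) :
    ∀ fuel (c : Nat) acc, 1 ≤ c → src.toList.length + 1 ≤ c + fuel →
      pvBLoop src (pvPats commands) fuel
          (PySem.Str.findFrom src "\\" (c : Int) none) acc
        = acc ++ pvCanonF src.toList (pvPats commands) c := by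
  have hbs : ("\\" : String).toList = ['\\'] := rfl
  intro fuel
  induction fuel with
  | zero =>
    intro c acc h1 hle
    rw [pvBLoop, pvCanonF, PySem.List.pyRange_one_eq_nil (by omega)]
    simp
  | succ fuel ih =>
    intro c acc h1 hle
    rw [PySem.Str.findFrom_eq, hbs]
    by_cases hclen : c ≤ src.toList.length
    · by_cases hf : PySem.Chars.findFrom src.toList ['\\'] (c : Int) none = -1
      · have hninf : ¬ ['\\'] <:+: src.toList.drop c :=
          (PySem.Chars.findFrom_natCast_eq_neg_one_iff _ _ c hclen).mp hf
        rw [hf, pvBLoop, if_pos rfl]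
        have hnil : pvCanonF src.toList (pvPats commands) c = [] := by
          rw [pvCanonF, List.filterMap_eq_nil_iff]
          intro j hj
          rw [PySem.List.mem_pyRange_one] at hj
          rw [pvFM_none_of_no_bs src.toList (pvPats commands) (pvPats_head commands) j.toNat
            (fun hp => hninf (pvPrefix_drop_infix _ _ c j.toNat (by omega) hp))]
          rfl
        rw [hnil]
        simp
      · obtain ⟨hge, hpre, hmin⟩ :=
          PySem.Chars.findFrom_natCast_spec src.toList ['\\'] c hclen hf
        set f := PySem.Chars.findFrom src.toList ['\\'] (c : Int) none with hfdef
        have hfpos : 0 ≤ f := by omega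
        have hflen : f.toNat < src.toList.length :=
          pvPrefix_lt_len src.toList ['\\'] f.toNat (by simp) hpre
        rw [pvBLoop, if_neg (by omega)]
        have hstep : PySem.Str.findFrom src "\\" (f + 1) none
            = PySem.Str.findFrom src "\\" (((f.toNat + 1 : Nat) : Int)) none := by
          congr 1
          omega
        simp only [hstep, pvBFirst_eq_pvFM]
        rw [ih (f.toNat + 1) _ (by omega) (by omega)]
        have hmid : ∀ k, c ≤ k → k < f.toNat →
            pvFM src.toList k (pvPats commands) = none := fun k hk1 hk2 =>
          pvFM_none_of_no_bs src.toList (pvPats commands) (pvPats_head commands) k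
            (hmin k hk1 hk2)
        have hsplit : pvCanonF src.toList (pvPats commands) c
            = (match pvFM src.toList f.toNat (pvPats commands) with
                | some nm => [((f.toNat : Int), nm)]
                | none => ([] : List (Int × String)))
              ++ pvCanonF src.toList (pvPats commands) (f.toNat + 1) := by
          rw [pvCanonF, PySem.List.pyRange_one_append (c : Int) (f.toNat : Int)
              (src.toList.length) (by omega) (by omega),
            PySem.List.pyRange_one_cons (a := (f.toNat : Int)) (b := (src.toList.length : Int))
              (by omega)]
          have hfirst : List.filterMap
              (fun j => (pvFM src.toList j.toNat (pvPats commands)).map (fun nm => (j, nm)))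
              (PySem.List.pyRange (c : Int) (f.toNat : Int) 1) = [] := by
            rw [List.filterMap_eq_nil_iff]
            intro j hj
            rw [PySem.List.mem_pyRange_one] at hj
            rw [hmid j.toNat (by omega) (by omega)]
            rfl
          rw [List.filterMap_append, hfirst, List.nil_append, pvCanonF]
          have hrg : PySem.List.pyRange ((f.toNat : Int) + 1) (src.toList.length) 1
              = PySem.List.pyRange (((f.toNat + 1 : Nat)) : Int) (src.toList.length) 1 := by
            norm_cast
          rw [List.filterMap_cons, hrg, Int.toNat_natCast]
          cases hfm : pvFM src.toList f.toNat (pvPats commands) <;> simp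
        rw [hsplit]
        have hfnat : f = ((f.toNat : Nat) : Int) := (Int.toNat_of_nonneg hfpos).symm
        cases hfm : pvFM src.toList f.toNat (pvPats commands) with
        | none => simp
        | some nm =>
          rw [← hfnat]
          simp
    · have hf : PySem.Chars.findFrom src.toList ['\\'] (c : Int) none = -1 :=
        pvFindFrom_gt_len src.toList ['\\'] c (by omega)
      rw [hf, pvBLoop, if_pos rfl, pvCanonF,
        PySem.List.pyRange_one_eq_nil (by omega)]
      simp

lemma pvB_eq_canon (src : String) (commands : List String) :
    find_indexed_commands_alt src commands
      = pvCanon src.toList (pvPats commands) 0 := by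
  have h := pvBLoop_eq src commands (src.toList.length + 1) 1 [] (le_refl 1) (by omega)
  rw [pvCanon_eq_F]
  simp only [find_indexed_commands_alt]
  rw [show ((1 : Nat) : Int) = (1 : Int) from by norm_num] at h
  rw [show commands.flatMap (fun c => pvSuffixes.map
      (fun sfx => ("\\" ++ c ++ sfx, c ++ PySem.Str.slice sfx none (some (-1)))))
    = pvPats commands from rfl]
  rw [h]
  simp

-- ===== VERDICT (by name: the statement is the Claim_ definition above) =====
theorem find_indexed_commands_spec : Claim_equal_find_indexed_commands := by
  intro src commands _
  unfold Spec_find_indexed_commands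
  rw [pvA_eq_canon, pvB_eq_canon]
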